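-- pv_equiv track=rewrite | github.com/elice-python-coding/Jiyoon | python_algorithm/Array/04.py | arrayPartition1
-- ===== SOURCE A (Python) =====
-- def arrayPartition1(nums):
--     nums.sort()
--     pair = []
--     sum = 0
--
--     for n in nums:
--         # 앞에서부터 오름차순으로 페어를 만들어서 합 계산
--         pair.append(n)
--         if len(pair) == 2:
--             sum += min(pair)
--             pair = []
--
--     return sum
-- ===== SOURCE B (Python) =====
-- def arrayPartition1(nums):
--     nums.sort()
--     # after sorting, the min of each consecutive pair is its first (even-indexed) element
--     return sum(nums[i] for i in range(0, len(nums) - 1, 2))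
-- ===== Notes on version B (the rewrite author's own statement) =====
-- stated objective: simpler
-- what changed: Replaces the pair-buffer accumulation loop (append, flush on length 2, min of the buffer) with a direct strided sum of the even-indexed elements of the sorted list, which are the pair minima.
import Mathlib
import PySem

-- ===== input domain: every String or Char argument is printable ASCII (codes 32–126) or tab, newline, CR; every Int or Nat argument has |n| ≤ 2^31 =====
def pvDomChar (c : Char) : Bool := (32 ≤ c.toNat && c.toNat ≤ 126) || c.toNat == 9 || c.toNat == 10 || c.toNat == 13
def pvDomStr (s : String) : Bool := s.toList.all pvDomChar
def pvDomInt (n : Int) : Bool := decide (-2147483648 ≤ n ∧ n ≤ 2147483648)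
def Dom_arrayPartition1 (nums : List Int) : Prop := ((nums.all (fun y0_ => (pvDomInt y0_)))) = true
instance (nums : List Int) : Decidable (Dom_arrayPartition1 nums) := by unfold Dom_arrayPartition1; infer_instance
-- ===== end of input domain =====

-- B replaces A's pair-buffer loop with a strided sum of even-indexed elements of the
-- sorted list (simpler decomposition; same cost). Both Pythons sort nums IN PLACE
-- (identical mutation); the equivalence proved here is about the return value.

-- ===== PORT A =====
def arrayPartition1 (nums : List Int) : Int :=
  let nums₁ := PySem.List.sorted nums (fun x => x) false
  let st := nums₁.foldl
    (fun (st : List Int × Int) n =>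
      let pair := st.1 ++ [n]
      if pair.length = 2 then ([], st.2 + (PySem.List.min? pair (fun x => x)).getD 0)
      else (pair, st.2)) ([], 0)
  st.2

-- ===== PORT B =====
def arrayPartition1_alt (nums : List Int) : Int :=
  let s := PySem.List.sorted nums (fun x => x) false
  ((PySem.List.pyRange 0 ((s.length : Int) - 1) 2).map
      (fun i => PySem.List.pyGetD s i 0)).sum

-- ===== PRECONDITION & SPEC =====
def Spec_arrayPartition1 (nums : List Int) (out : Int) : Prop := out = arrayPartition1_alt nums
instance (nums : List Int) (out : Int) : Decidable (Spec_arrayPartition1 nums out) := by unfold Spec_arrayPartition1; infer_instance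

-- ===== CLAIM (what is proved, stated in full; the proofs are below) =====
def Claim_equal_arrayPartition1 : Prop := ∀ (nums : List Int), Dom_arrayPartition1 nums → Spec_arrayPartition1 nums (arrayPartition1 nums)

-- ===== LEMMAS AND PROOFS =====

/-- Sum of the first element of each consecutive pair (the common value of both loops). -/
def pvPairSum : List Int → Int
  | a :: _ :: t => a + pvPairSum t
  | _ => 0

/-- A's pair-buffer fold, on a weakly increasing list, computes `acc + pvPairSum l`. -/
theorem pvFoldA : ∀ (l : List Int) (acc : Int), l.Pairwise (· ≤ ·) →
    (l.foldl
      (fun (st : List Int × Int) n =>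
        let pair := st.1 ++ [n]
        if pair.length = 2 then ([], st.2 + (PySem.List.min? pair (fun x => x)).getD 0)
        else (pair, st.2)) ([], acc)).2 = acc + pvPairSum l
  | [], acc, _ => by simp [pvPairSum]
  | [a], acc, _ => by simp [pvPairSum, List.foldl]
  | a :: b :: t, acc, hp => by
    have hab : a ≤ b := by
      rcases List.pairwise_cons.mp hp with ⟨h1, _⟩
      exact h1 b (by simp)
    have hmin : (PySem.List.min? [a, b] (fun x => x)).getD 0 = a := by
      simp [PySem.List.min?, List.foldl]
      split_ifs with h
      · simp only [Option.getD_some]; omega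
      · simp
    have ht : t.Pairwise (· ≤ ·) :=
      ((List.pairwise_cons.mp (List.pairwise_cons.mp hp).2).2)
    have ih := pvFoldA t (acc + a) ht
    simp only [List.foldl] at ih ⊢
    norm_num [hmin] at ih ⊢
    rw [ih]
    simp only [pvPairSum]
    ring

/-- The strided sum of even-indexed elements over the full pairs equals `pvPairSum`. -/
theorem pvSumEven : ∀ (xs : List Int),
    ((List.range (xs.length / 2)).map (fun k => xs.getD (2 * k) 0)).sum = pvPairSum xs
  | [] => by simp [pvPairSum]
  | [a] => by simp [pvPairSum]
  | a :: b :: t => by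
    have ih := pvSumEven t
    have hlen : (a :: b :: t).length / 2 = t.length / 2 + 1 := by
      simp [List.length_cons]; omega
    rw [hlen, List.range_succ_eq_map]
    simp only [List.map_cons, List.map_map, List.sum_cons]
    have hsh : ∀ k : Nat, (a :: b :: t).getD (2 * (k + 1)) 0 = t.getD (2 * k) 0 := by
      intro k
      have h2 : 2 * (k + 1) = (2 * k) + 1 + 1 := by omega
      rw [h2]
      simp [List.getD]
    have hmap : ((List.range (t.length / 2)).map
        ((fun k => (a :: b :: t).getD (2 * k) 0) ∘ (fun k => k + 1))) =
        (List.range (t.length / 2)).map (fun k => t.getD (2 * k) 0) := by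
      refine List.map_congr_left (fun k _ => ?_)
      simpa using hsh k
    calc (a :: b :: t).getD (2 * 0) 0
        + (((List.range (t.length / 2)).map
            ((fun k => (a :: b :: t).getD (2 * k) 0) ∘ (fun k => k + 1)))).sum
        = a + ((List.range (t.length / 2)).map (fun k => t.getD (2 * k) 0)).sum := by
          rw [hmap]; rfl
      _ = a + pvPairSum t := by rw [ih]
      _ = pvPairSum (a :: b :: t) := rfl

/-- The count produced by `range(0, n-1, 2)` is `n / 2`. -/
theorem pvCount (n : Nat) :
    (if (0 : Int) < (n : Int) - 1 then (((n : Int) - 1 + 2 - 1) / 2).toNat else 0) = n / 2 := by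
  split_ifs with h
  · omega
  · omega

-- ===== VERDICT (by name: the statement is the Claim_ definition above) =====
theorem arrayPartition1_spec : Claim_equal_arrayPartition1 := by
  intro nums _
  have hp : (PySem.List.sorted nums (fun x => x) false).Pairwise (· ≤ ·) :=
    PySem.List.sorted_pairwise nums (fun x => x)
  unfold Spec_arrayPartition1 arrayPartition1 arrayPartition1_alt
  generalize hgen : PySem.List.sorted nums (fun x => x) false = s at hp ⊢
  show (s.foldl
      (fun (st : List Int × Int) n =>
        let pair := st.1 ++ [n]
        if pair.length = 2 then ([], st.2 + (PySem.List.min? pair (fun x => x)).getD 0)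
        else (pair, st.2)) ([], 0)).2 =
    ((PySem.List.pyRange 0 ((s.length : Int) - 1) 2).map
      (fun i => PySem.List.pyGetD s i 0)).sum
  rw [PySem.List.pyRange_of_pos 0 ((s.length : Int) - 1) (by norm_num)]
  simp only [Int.sub_zero]
  rw [pvCount s.length, List.map_map]
  have hmap : ((List.range (s.length / 2)).map
      ((fun i => PySem.List.pyGetD s i 0) ∘ fun (k : Nat) => (0 : Int) + 2 * (k : Int))) =
      (List.range (s.length / 2)).map (fun k => s.getD (2 * k) 0) := by
    refine List.map_congr_left (fun k _ => ?_)
    have hcast : (0 : Int) + 2 * (k : Int) = ((2 * k : Nat) : Int) := by push_cast; ring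
    simp only [Function.comp_apply]
    rw [hcast, PySem.List.pyGetD_natCast]
  rw [hmap, pvSumEven s, pvFoldA s 0 hp]
  simp
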